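-- pv_equiv track=rewrite | github.com/davidebuggin/AdventOfCode | day03/firstPart.py | max_from_bank
-- ===== SOURCE A (Python) =====
-- def max_from_bank(s):
--     n = len(s)
--     if n < 2:
--         return 0
--
--     digits = [ord(c) - 48 for c in s]
--
--     suffix_max_right = [-1] * n
--     suffix_max_right[-1] = -1
--     for i in range(n - 2, -1, -1):
--         d = digits[i + 1]
--         prev = suffix_max_right[i + 1]
--         suffix_max_right[i] = d if d > prev else prev
--
--     best = 0
--     for i in range(0, n - 1):
--         right_max = suffix_max_right[i]
--         if right_max >= 0:
--             candidate = 10 * digits[i] + right_max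
--             if candidate > best:
--                 best = candidate
--
--     return best
-- ===== SOURCE B (Python) =====
-- def max_from_bank(s):
--     # Single right-to-left pass: running max of digits to the right, no suffix table.
--     if len(s) < 2:
--         return 0
--     running = -1
--     best = 0
--     for c in reversed(s):
--         d = ord(c) - 48
--         if running >= 0:
--             candidate = 10 * d + running
--             if candidate > best:
--                 best = candidate
--         if d > running:
--             running = d
--     return best
-- ===== Notes on version B (the rewrite author's own statement) =====
-- stated objective: simpler
-- what changed: Replaced the precomputed suffix-max table and the separate left-to-right scan with a single right-to-left pass keeping a running max of the digits seen so far.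
import Mathlib
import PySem

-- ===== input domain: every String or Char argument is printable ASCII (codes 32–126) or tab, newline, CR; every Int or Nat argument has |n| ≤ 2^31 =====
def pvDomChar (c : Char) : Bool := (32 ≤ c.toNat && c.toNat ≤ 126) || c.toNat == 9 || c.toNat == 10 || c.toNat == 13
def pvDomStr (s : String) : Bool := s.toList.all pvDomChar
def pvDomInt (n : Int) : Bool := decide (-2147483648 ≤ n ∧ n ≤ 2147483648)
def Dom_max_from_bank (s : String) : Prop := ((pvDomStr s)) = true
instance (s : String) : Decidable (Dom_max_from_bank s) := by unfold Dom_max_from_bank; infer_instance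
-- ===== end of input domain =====

-- B replaces A's precomputed suffix-max table and second scan by one right-to-left
-- pass with a running max of the digits already seen (objective: simpler, O(1) extra space).

-- ===== PORT A =====
def max_from_bank (s : String) : Int :=
  let n : Int := PySem.Str.len s
  if n < 2 then 0
  else
    let digits : List Int := s.toList.map (fun c => (c.toNat : Int) - 48)
    let suffix0 : List Int := List.replicate n.toNat (-1)
    let suffix1 : List Int := PySem.List.pySetD suffix0 (-1) (-1)
    let suffix : List Int :=
      (PySem.List.pyRange (n - 2) (-1) (-1)).foldl
        (fun suf i =>
          let d := PySem.List.pyGetD digits (i + 1) 0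
          let prev := PySem.List.pyGetD suf (i + 1) 0
          PySem.List.pySetD suf i (if d > prev then d else prev)) suffix1
    (PySem.List.pyRange 0 (n - 1) 1).foldl
      (fun best i =>
        let rightMax := PySem.List.pyGetD suffix i 0
        if rightMax ≥ 0 then
          let candidate := 10 * PySem.List.pyGetD digits i 0 + rightMax
          if candidate > best then candidate else best
        else best) 0

-- ===== PORT B =====
def max_from_bank_alt (s : String) : Int :=
  if PySem.Str.len s < 2 then 0
  else
    (s.toList.reverse.foldl
      (fun (rb : Int × Int) c =>
        let d : Int := (c.toNat : Int) - 48
        let best := if rb.1 ≥ 0 then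
            (if 10 * d + rb.1 > rb.2 then 10 * d + rb.1 else rb.2)
          else rb.2
        ((if d > rb.1 then d else rb.1), best)) ((-1 : Int), (0 : Int))).2

-- ===== PRECONDITION & SPEC =====
def Spec_max_from_bank (s : String) (out : Int) : Prop := out = max_from_bank_alt s
instance (s : String) (out : Int) : Decidable (Spec_max_from_bank s out) := by unfold Spec_max_from_bank; infer_instance

-- ===== CLAIM (what is proved, stated in full; the proofs are below) =====
def Claim_equal_max_from_bank : Prop := ∀ (s : String), Dom_max_from_bank s → Spec_max_from_bank s (max_from_bank s)

-- ===== LEMMAS AND PROOFS =====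

-- suffix maximum of a digit list, initialised to -1 (A's table values)
def pvM (l : List Int) : Int := l.foldr (fun d p => if d > p then d else p) (-1)

-- B's fold: (running max, best), processing digits right to left
def pvB (l : List Int) : Int × Int :=
  l.foldr (fun d rb =>
    ((if d > rb.1 then d else rb.1),
     if rb.1 ≥ 0 then (if 10 * d + rb.1 > rb.2 then 10 * d + rb.1 else rb.2) else rb.2))
    ((-1 : Int), (0 : Int))

-- A's second loop, recast structurally
def pvA : List Int → Int → Int
  | [], b => b
  | d :: t, b =>
    pvA t (if pvM t ≥ 0 then (if 10 * d + pvM t > b then 10 * d + pvM t else b) else b)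

lemma pvB_fst (l : List Int) : (pvB l).1 = pvM l := by
  induction l with
  | nil => rfl
  | cons d t ih => simp [pvB, pvM] at ih ⊢; rw [ih]

lemma pvB_nonneg (l : List Int) : 0 ≤ (pvB l).2 := by
  induction l with
  | nil => norm_num [pvB]
  | cons d t ih => simp only [pvB, List.foldr] at ih ⊢; split_ifs <;> omega

lemma pvA_eq (l : List Int) : ∀ b : Int, 0 ≤ b →
    pvA l b = if (pvB l).2 > b then (pvB l).2 else b := by
  induction l with
  | nil => intro b hb; simp [pvA, pvB]; omega
  | cons d t ih =>
    intro b hb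
    have h1 : (pvB (d :: t)).2 =
        if pvM t ≥ 0 then (if 10 * d + pvM t > (pvB t).2 then 10 * d + pvM t else (pvB t).2)
        else (pvB t).2 := by
      simp only [pvB, List.foldr]; rw [← pvB_fst]; rfl
    have h2 := pvB_nonneg t
    rw [pvA, ih _ (by split_ifs <;> omega), h1]
    split_ifs <;> omega

lemma pvA_short (l : List Int) (b : Int) (h : l.length ≤ 1) : pvA l b = b := by
  match l, h with
  | [], _ => rfl
  | [d], _ => simp [pvA, pvM]


lemma pv_setD_replicate (n : Nat) (i : Int) :
    PySem.List.pySetD (List.replicate n (-1 : Int)) i (-1) = List.replicate n (-1) := by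
  unfold PySem.List.pySetD PySem.List.pySet?
  rcases h : PySem.List.pyIdx? (List.replicate n (-1 : Int)).length i with _ | k <;>
    simp [List.set_replicate_self]

-- A's first loop establishes:  suffix[k] = pvM (digits.drop (k+1)) for every k < n
lemma pv_build (l : List Int) (m : Nat) (hm : m ≤ l.length - 1) :
    ∀ suf : List Int, suf.length = l.length →
    (∀ k : Nat, m ≤ k → k < l.length → suf.getD k 0 = pvM (l.drop (k + 1))) →
    ((PySem.List.pyRange ((m : Int) - 1) (-1) (-1)).foldl
      (fun suf i =>
        let d := PySem.List.pyGetD l (i + 1) 0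
        let prev := PySem.List.pyGetD suf (i + 1) 0
        PySem.List.pySetD suf i (if d > prev then d else prev)) suf).length = l.length ∧
    ∀ k : Nat, k < l.length →
      ((PySem.List.pyRange ((m : Int) - 1) (-1) (-1)).foldl
        (fun suf i =>
          let d := PySem.List.pyGetD l (i + 1) 0
          let prev := PySem.List.pyGetD suf (i + 1) 0
          PySem.List.pySetD suf i (if d > prev then d else prev)) suf).getD k 0 =
        pvM (l.drop (k + 1)) := by
  induction m with
  | zero =>
    intro suf hlen hval
    rw [PySem.List.pyRange_neg_one_eq_nil (by norm_num)]
    exact ⟨hlen, fun k hk => hval k (Nat.zero_le k) hk⟩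
  | succ m ih =>
    intro suf hlen hval
    have hm1 : m + 1 < l.length := by omega
    rw [show (((m + 1 : Nat) : Int) - 1) = (m : Int) by push_cast; ring,
       PySem.List.pyRange_neg_one_cons (by omega), List.foldl_cons]
    have hd : PySem.List.pyGetD l ((m : Int) + 1) 0 = l.getD (m + 1) 0 := by
      have : ((m : Int) + 1) = ((m + 1 : Nat) : Int) := by push_cast; ring
      rw [this, PySem.List.pyGetD_natCast]
    have hprev : PySem.List.pyGetD suf ((m : Int) + 1) 0 = pvM (l.drop (m + 2)) := by
      have h1 : ((m : Int) + 1) = ((m + 1 : Nat) : Int) := by push_cast; ring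
      rw [h1, PySem.List.pyGetD_natCast, hval (m + 1) (le_refl _) hm1]
    simp only [hd, hprev, PySem.List.pySetD_natCast]
    apply ih (by omega)
    · simpa using hlen
    · intro k hk hk2
      rcases eq_or_lt_of_le hk with hkm | hkm
      · obtain rfl : k = m := hkm.symm
        have hklen : k < suf.length := by omega
        rw [List.getD_eq_getElem _ _ (by simpa [hlen] using hklen),
            List.getElem_set_self (by simpa using hklen)]
        have hdrop : l.drop (k + 1) = l[k + 1] :: l.drop (k + 2) :=
          (List.getElem_cons_drop (by omega)).symm
        rw [hdrop, List.getD_eq_getElem _ _ (by omega)]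
        simp [pvM, List.foldr]
      · have : (suf.set m (if l.getD (m + 1) 0 > pvM (l.drop (m + 2)) then l.getD (m + 1) 0
            else pvM (l.drop (m + 2)))).getD k 0 = suf.getD k 0 := by
          rw [List.getD_eq_getElem _ _ (by simpa [hlen] using hk2),
              List.getElem_set_ne (by omega), ← List.getD_eq_getElem _ _ (by omega)]
        rw [this]
        exact hval k (by omega) hk2

-- A's second loop equals pvA on the dropped suffix
lemma pv_scan (l : List Int) (m : Nat) :
    ∀ (a : Nat), a + m = l.length - 1 → ∀ b : Int,
    (PySem.List.pyRange (a : Int) ((l.length : Int) - 1) 1).foldl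
      (fun best i =>
        if pvM (l.drop (i.toNat + 1)) ≥ 0 then
          (if 10 * l.getD i.toNat 0 + pvM (l.drop (i.toNat + 1)) > best then
            10 * l.getD i.toNat 0 + pvM (l.drop (i.toNat + 1)) else best)
        else best) b = pvA (l.drop a) b := by
  induction m with
  | zero =>
    intro a ha b
    rw [PySem.List.pyRange_one_eq_nil (by omega)]
    exact (pvA_short _ _ (by simp; omega)).symm
  | succ m ih =>
    intro a ha b
    have hal : a < l.length := by omega
    rw [PySem.List.pyRange_one_cons (by omega), List.foldl_cons]
    have hcast : ((a : Int) + 1) = ((a + 1 : Nat) : Int) := by omega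
    rw [hcast, ih (a + 1) (by omega)]
    have hdrop : l.drop a = l[a] :: l.drop (a + 1) := (List.getElem_cons_drop hal).symm
    rw [hdrop, pvA]
    simp only [Int.toNat_natCast, List.getD_eq_getElem _ _ hal]
-- A's second loop, for any table S agreeing with the suffix maxima
lemma pv_second (l S : List Int)
    (hval : ∀ k : Nat, k < l.length → S.getD k 0 = pvM (l.drop (k + 1))) :
    (PySem.List.pyRange 0 ((l.length : Int) - 1) 1).foldl
      (fun best i =>
        let rightMax := PySem.List.pyGetD S i 0
        if rightMax ≥ 0 then
          let candidate := 10 * PySem.List.pyGetD l i 0 + rightMax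
          if candidate > best then candidate else best
        else best) 0 = pvA l 0 := by
  have step1 :
      (PySem.List.pyRange 0 ((l.length : Int) - 1) 1).foldl
        (fun best i =>
          let rightMax := PySem.List.pyGetD S i 0
          if rightMax ≥ 0 then
            let candidate := 10 * PySem.List.pyGetD l i 0 + rightMax
            if candidate > best then candidate else best
          else best) 0 =
      (PySem.List.pyRange 0 ((l.length : Int) - 1) 1).foldl
        (fun best i =>
          if pvM (l.drop (i.toNat + 1)) ≥ 0 then
            (if 10 * l.getD i.toNat 0 + pvM (l.drop (i.toNat + 1)) > best then
              10 * l.getD i.toNat 0 + pvM (l.drop (i.toNat + 1)) else best)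
          else best) 0 := by
    apply PySem.List.foldl_congr_mem
    intro acc x hx
    rw [PySem.List.mem_pyRange_one] at hx
    have hxl : x.toNat < l.length := by omega
    rw [show x = ((x.toNat : Nat) : Int) by omega, PySem.List.pyGetD_natCast,
        PySem.List.pyGetD_natCast, Int.toNat_natCast,
        hval x.toNat hxl]
  rw [step1]
  have h0 := pv_scan l (l.length - 1) 0 (by omega) 0
  simpa using h0

-- ===== VERDICT (by name: the statement is the Claim_ definition above) =====
theorem max_from_bank_spec : Claim_equal_max_from_bank := by
  intro s _
  unfold Spec_max_from_bank max_from_bank max_from_bank_alt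
  by_cases hn : PySem.Str.len s < 2
  · have h1 : s.length ≤ 1 := by
      rw [PySem.Str.len_eq] at hn; rw [← String.length_toList]; omega
    simp [h1]
  · simp only [hn, if_false]
    have hsl : PySem.Str.len s = ((s.toList.length : Nat) : Int) := by
      simp [PySem.Str.len_eq, String.length_toList]
    set cs := s.toList with hcs
    set l : List Int := cs.map (fun c => (c.toNat : Int) - 48) with hl
    set N : Nat := cs.length with hN
    have hN2 : 2 ≤ N := by
      rw [PySem.Str.len_eq] at hn; rw [hN, hcs]; omega
    have hll : l.length = N := by simp [hl, hN]
    rw [hsl, Int.toNat_natCast, pv_setD_replicate,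
       show ((N : Int) - 2) = (((N - 1 : Nat) : Int) - 1) by omega]
    obtain ⟨hSlen, hSval⟩ := pv_build l (N - 1) (by omega) (List.replicate N (-1))
      (by simp [hll])
      (by
        intro k h1 h2
        have hk : k = N - 1 := by omega
        subst hk
        rw [List.drop_of_length_le (by omega),
            List.getD_eq_getElem _ _ (by simp; omega), List.getElem_replicate]
        rfl)
    rw [show ((N : Int) - 1) = ((l.length : Int) - 1) by rw [hll]]
    rw [pv_second l _ hSval]
    have hB : pvB l = cs.reverse.foldl
        (fun (rb : Int × Int) c =>
          ((if (c.toNat : Int) - 48 > rb.1 then (c.toNat : Int) - 48 else rb.1),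
           if rb.1 ≥ 0 then
             (if 10 * ((c.toNat : Int) - 48) + rb.1 > rb.2 then
               10 * ((c.toNat : Int) - 48) + rb.1 else rb.2)
           else rb.2)) ((-1 : Int), (0 : Int)) := by
      rw [List.foldl_reverse, pvB, hl, List.foldr_map]
    rw [← hB, pvA_eq l 0 le_rfl]
    have := pvB_nonneg l
    split_ifs <;> omega
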